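-- pv_equiv track=rewrite | github.com/AlexanderRagnarsson/M | Verkefni/Verkefni 9/paragraph_analysis.py | make_paragraph_dict
-- ===== SOURCE A (Python) =====
-- def make_paragraph_dict(paragraph_word_list):
--     """ Accepts a list of lists (inner list contains strings) and returns a
--         dictionary where word is the key and inner lists it apears in is the value """
--     paragraph_word_dict = {}
--
--     for paragraph_number in range(1, len(paragraph_word_list) + 1):
--         paragraph = paragraph_word_list[paragraph_number - 1]
--
--         for word in paragraph:
--             if word in paragraph_word_dict:
--                 paragraph_word_dict[word] = paragraph_word_dict[word] + ', ' + str(paragraph_number)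
--             else:
--                 paragraph_word_dict[word] = str(paragraph_number)
--     return paragraph_word_dict
-- ===== SOURCE B (Python) =====
-- def make_paragraph_dict(paragraph_word_list):
--     """Flatten to (word, paragraph-number-string) pairs, take the distinct words
--     in first-appearance order, then build each word's value by scanning the flat
--     pair list with a filter and joining -- no dict is accumulated while traversing."""
--     pairs = [(word, str(n))
--              for n, paragraph in enumerate(paragraph_word_list, 1)
--              for word in paragraph]
--     words = list(dict.fromkeys(w for w, _ in pairs))
--     return {w: ', '.join(s for x, s in pairs if x == w) for w in words}
-- ===== Notes on version B (the rewrite author's own statement) =====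
-- stated objective: alternative
-- what changed: A accumulates the result dict in one fused pass, growing each word's string by repeated concatenation; B never accumulates a dict during traversal: it flattens the input to a (word, number-string) pair list, dedups the words in first-appearance order, and computes each word's value by a per-word filter over the flat pair list followed by one join.
import Mathlib
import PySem

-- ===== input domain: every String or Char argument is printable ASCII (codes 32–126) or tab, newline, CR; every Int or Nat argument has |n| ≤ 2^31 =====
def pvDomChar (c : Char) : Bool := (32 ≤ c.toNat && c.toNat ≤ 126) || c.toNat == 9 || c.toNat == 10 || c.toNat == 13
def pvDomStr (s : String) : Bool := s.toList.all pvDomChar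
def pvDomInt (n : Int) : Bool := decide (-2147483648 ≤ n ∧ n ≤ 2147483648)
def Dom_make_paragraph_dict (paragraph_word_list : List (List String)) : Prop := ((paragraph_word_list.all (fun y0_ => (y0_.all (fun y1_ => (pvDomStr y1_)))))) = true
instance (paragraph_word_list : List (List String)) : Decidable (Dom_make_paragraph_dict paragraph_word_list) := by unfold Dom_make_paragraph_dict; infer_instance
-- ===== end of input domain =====

-- B replaces A's fused dict-accumulating pass by: flatten to (word, number-string) pairs,
-- dedup the words in first-appearance order, and group by a per-word filter + join (alternative decomposition).


-- ===== PORT A =====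
-- literal port of A: for paragraph_number in range(1, len+1): paragraph = pwl[paragraph_number-1];
-- for word in paragraph: rebuild the word's string (the index paragraph_number-1 is always in range,
-- so pyGetD's default [] is never used)
def make_paragraph_dict (paragraph_word_list : List (List String)) : List (String × String) :=
  ((PySem.List.pyRange 1 ((paragraph_word_list.length : Int) + 1) 1).foldl (fun d paragraph_number =>
      (PySem.List.pyGetD paragraph_word_list (paragraph_number - 1) []).foldl (fun d word =>
        if d.contains word then
          d.insert word (d.getD word "" ++ ", " ++ PySem.Int.toStr paragraph_number)
        else
          d.insert word (PySem.Int.toStr paragraph_number)) d)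
    PySem.Dict.empty).items

-- ===== PORT B =====
-- literal port of B: pairs = flattened (word, str(n)) list; words = list(dict.fromkeys(...)) is
-- PySem.List.dedup; result = per-word filter over pairs, joined with ', '
def make_paragraph_dict_alt (paragraph_word_list : List (List String)) : List (String × String) :=
  let pairs := (PySem.List.enumerate paragraph_word_list 1).flatMap
      (fun q => q.2.map (fun w => (w, PySem.Int.toStr q.1)))
  let words := PySem.List.dedup (pairs.map (·.1))
  words.map (fun w => (w, PySem.Str.join ", " ((pairs.filter (fun p => p.1 == w)).map (·.2))))

-- ===== PRECONDITION & SPEC =====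
def Spec_make_paragraph_dict (paragraph_word_list : List (List String)) (out : List (String × String)) : Prop := out = make_paragraph_dict_alt paragraph_word_list
instance (paragraph_word_list : List (List String)) (out : List (String × String)) : Decidable (Spec_make_paragraph_dict paragraph_word_list out) := by unfold Spec_make_paragraph_dict; infer_instance

-- ===== CLAIM (what is proved, stated in full; the proofs are below) =====
def Claim_equal_make_paragraph_dict : Prop := ∀ (paragraph_word_list : List (List String)), Dom_make_paragraph_dict paragraph_word_list → Spec_make_paragraph_dict paragraph_word_list (make_paragraph_dict paragraph_word_list)

-- ===== LEMMAS AND PROOFS =====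

-- A's loop step on one (word, numberString) pair
def stepA (d : PySem.Dict String String) (p : String × String) : PySem.Dict String String :=
  if d.contains p.1 then d.insert p.1 (d.getD p.1 "" ++ ", " ++ p.2) else d.insert p.1 p.2

-- the flattened sequence of (word, str(paragraph_number)) pairs both versions process
def pairsOf (pwl : List (List String)) : List (String × String) :=
  (PySem.List.enumerate pwl 1).flatMap (fun q => q.2.map (fun w => (w, PySem.Int.toStr q.1)))

-- the number-strings recorded for word c
def occ (pairs : List (String × String)) (c : String) : List String :=
  (pairs.filter (fun p => p.1 == c)).map (·.2)

theorem join_cc (a b : String) (l : List String) :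
    PySem.Str.join ", " ((a ++ ", " ++ b) :: l) = a ++ ", " ++ PySem.Str.join ", " (b :: l) := by
  apply String.ext
  cases l with
  | nil => simp [PySem.Str.join, PySem.Chars.join, List.intercalate]
  | cons c l => simp [PySem.Str.join, PySem.Chars.join, List.intercalate]

theorem join_cons2 (a b : String) (l : List String) :
    PySem.Str.join ", " (a :: b :: l) = a ++ ", " ++ PySem.Str.join ", " (b :: l) := by
  apply String.ext; simp [PySem.Str.join, PySem.Chars.join, List.intercalate]

theorem join_single (a : String) : PySem.Str.join ", " [a] = a := by
  apply String.ext; simp [PySem.Str.join, PySem.Chars.join, List.intercalate]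

theorem foldl_flatMap {α β γ : Type} (l : List α) (g : α → List β) (f : γ → β → γ) (d : γ) :
    (l.flatMap g).foldl f d = l.foldl (fun d a => (g a).foldl f d) d := by
  induction l generalizing d with
  | nil => rfl
  | cons x xs ih => simp [List.foldl_append, ih]

-- A's 1-based index loop over range(1, len+1) is the loop over enumerate(pwl, 1)
theorem rangeA {γ : Type} (inner : γ → Int → List String → γ) :
    ∀ (pwl : List (List String)) (d : γ),
    (PySem.List.pyRange 1 ((pwl.length : Int) + 1) 1).foldl
        (fun d n => inner d n (PySem.List.pyGetD pwl (n - 1) [])) d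
      = (PySem.List.enumerate pwl 1).foldl (fun d q => inner d q.1 q.2) d := by
  intro pwl
  induction pwl using List.reverseRecOn with
  | nil => intro d; simp [PySem.List.pyRange_one_eq_nil, PySem.List.enumerate]
  | append_singleton xs x ih =>
    intro d
    have hlen : ((xs ++ [x]).length : Int) = (xs.length : Int) + 1 := by simp
    have hpre : ∀ (d : γ),
        (PySem.List.pyRange 1 ((xs.length : Int) + 1) 1).foldl
          (fun d n => inner d n (PySem.List.pyGetD (xs ++ [x]) (n - 1) [])) d
        = (PySem.List.enumerate xs 1).foldl (fun d q => inner d q.1 q.2) d := by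
      intro d
      rw [← ih]
      apply PySem.List.foldl_congr_mem
      intro acc n hn
      rw [PySem.List.mem_pyRange_one] at hn
      have hk : n - 1 = (((n - 1).toNat : Nat) : Int) := by omega
      rw [hk, PySem.List.pyGetD_natCast, PySem.List.pyGetD_natCast,
          List.getD_append _ _ _ _ (by omega)]
    rw [hlen, PySem.List.pyRange_one_succ_right (by omega), List.foldl_append,
        PySem.List.enumerate_append, List.foldl_append, hpre]
    simp [PySem.List.enumerate]
    rw [add_comm ((xs.length : Int)) 1]

-- the value A's loop leaves for word c: the join of the recorded occurrences
theorem getD_foldA (c : String) (pairs : List (String × String)) (d : PySem.Dict String String) :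
    (pairs.foldl stepA d).getD c "" =
      if d.contains c then PySem.Str.join ", " (d.getD c "" :: occ pairs c)
      else PySem.Str.join ", " (occ pairs c) := by
  induction pairs generalizing d with
  | nil =>
    simp [occ]
    split
    · rw [join_single]
    · next h => rw [PySem.Dict.getD_of_not_contains _ _ (by simpa using h)]; rfl
  | cons p rest ih =>
    rw [List.foldl_cons, ih]
    by_cases hpc : p.1 = c
    · subst hpc
      have hocc : occ (p :: rest) p.1 = p.2 :: occ rest p.1 := by simp [occ]
      rw [hocc]
      unfold stepA
      by_cases hc : d.contains p.1
      · simp [hc, PySem.Dict.contains_insert_self, PySem.Dict.getD_insert_self]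
        rw [join_cc, join_cons2]
      · simp [hc, PySem.Dict.contains_insert_self, PySem.Dict.getD_insert_self]
    · have hocc : occ (p :: rest) c = occ rest c := by simp [occ, hpc]
      have hcon : (stepA d p).contains c = d.contains c := by
        unfold stepA
        split <;> simp [PySem.Dict.contains_insert, beq_iff_eq, Ne.symm hpc]
      have hget : (stepA d p).getD c "" = d.getD c "" := by
        unfold stepA; split <;> rw [PySem.Dict.getD_insert_of_ne _ _ _ (Ne.symm hpc)]
      rw [hocc, hcon, hget]

-- stepA written as a single insert (for the keys lemmas)
theorem stepA_insert : stepA = fun (d : PySem.Dict String String) (p : String × String) =>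
    d.insert p.1 (if d.contains p.1 then d.getD p.1 "" ++ ", " ++ p.2 else p.2) := by
  funext d p; unfold stepA; split <;> rfl

-- A's key list is the first-occurrence dedup of the flattened words
theorem keysA (pairs : List (String × String)) :
    (pairs.foldl stepA PySem.Dict.empty).keys = PySem.List.dedup (pairs.map (·.1)) := by
  rw [stepA_insert, PySem.Dict.keys_foldl_insert_key, PySem.List.dedup_eq_ofList]
  rfl

theorem nodupA (pairs : List (String × String)) :
    (pairs.foldl stepA PySem.Dict.empty).keys.Nodup := by
  rw [stepA_insert]
  exact PySem.Dict.nodup_keys_foldl_insert_key _ _ _ _ (by simp)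

-- ===== VERDICT (by name: the statement is the Claim_ definition above) =====
theorem make_paragraph_dict_spec : Claim_equal_make_paragraph_dict := by
  intro pwl _
  unfold Spec_make_paragraph_dict make_paragraph_dict make_paragraph_dict_alt
  rw [rangeA (fun (d : PySem.Dict String String) (n : Int) (par : List String) =>
        par.foldl (fun d word =>
          if d.contains word then
            d.insert word (d.getD word "" ++ ", " ++ PySem.Int.toStr n)
          else
            d.insert word (PySem.Int.toStr n)) d) pwl PySem.Dict.empty]
  have hA : (PySem.List.enumerate pwl 1).foldl (fun d (q : Int × List String) =>
        q.2.foldl (fun d word =>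
          if d.contains word then
            d.insert word (d.getD word "" ++ ", " ++ PySem.Int.toStr q.1)
          else
            d.insert word (PySem.Int.toStr q.1)) d) PySem.Dict.empty
      = (pairsOf pwl).foldl stepA PySem.Dict.empty := by
    simp [pairsOf, foldl_flatMap, List.foldl_map, stepA]
  simp only [hA]
  rw [PySem.Dict.items_eq_map_keys _ (nodupA (pairsOf pwl)) "", keysA]
  show _ = (PySem.List.dedup ((pairsOf pwl).map (·.1))).map
      (fun w => (w, PySem.Str.join ", " (occ (pairsOf pwl) w)))
  apply List.map_congr_left
  intro k _
  have hgA := getD_foldA k (pairsOf pwl) PySem.Dict.empty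
  simp only [PySem.Dict.contains_empty, Bool.false_eq_true, if_false] at hgA
  rw [hgA]
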